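-- pv_equiv track=rewrite | github.com/TheLetterJ0/YGO-Scrambler | YGO_Scrambler.py | tokenize_string
-- ===== SOURCE A (Python) =====
-- def tokenize_string(input_string):
--     substrings = []
--     current_string = ""
--     alph_dig_other = 0
--
--     for char in input_string:
--         if char.isalpha():
--             if alph_dig_other == 1:
--                 current_string += char
--             else:
--                 alph_dig_other = 1
--                 if current_string:
--                     substrings.append(current_string)
--                 current_string = char
--         elif char.isdigit():
--             if alph_dig_other == 2:
--                 current_string += char
--             else:
--                 alph_dig_other = 2
--                 if current_string:
--                     substrings.append(current_string)
--                 current_string = char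
--         else:
--             if alph_dig_other == 3:
--                 current_string += char
--             else:
--                 alph_dig_other = 3
--                 if current_string:
--                     substrings.append(current_string)
--                 current_string = char
--
--     # Append the last number if there was one at the end of the string
--     if current_string:
--         substrings.append(current_string)
--
--     return substrings
-- ===== SOURCE B (Python) =====
-- def tokenize_string(input_string):
--     def key(c):
--         return 1 if c.isalpha() else 2 if c.isdigit() else 3
--
--     substrings = []
--     i, n = 0, len(input_string)
--     while i < n:
--         k = key(input_string[i])
--         j = i + 1
--         while j < n and key(input_string[j]) == k:
--             j += 1
--         substrings.append(input_string[i:j])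
--         i = j
--     return substrings
-- ===== Notes on version B (the rewrite author's own statement) =====
-- stated objective: alternative
-- what changed: Replaces A's state-machine accumulator (class flag + growing current_string + deferred appends) with a two-pointer run scanner: classify the run's first character, advance a second index over the run, and slice it out directly.
import Mathlib
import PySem

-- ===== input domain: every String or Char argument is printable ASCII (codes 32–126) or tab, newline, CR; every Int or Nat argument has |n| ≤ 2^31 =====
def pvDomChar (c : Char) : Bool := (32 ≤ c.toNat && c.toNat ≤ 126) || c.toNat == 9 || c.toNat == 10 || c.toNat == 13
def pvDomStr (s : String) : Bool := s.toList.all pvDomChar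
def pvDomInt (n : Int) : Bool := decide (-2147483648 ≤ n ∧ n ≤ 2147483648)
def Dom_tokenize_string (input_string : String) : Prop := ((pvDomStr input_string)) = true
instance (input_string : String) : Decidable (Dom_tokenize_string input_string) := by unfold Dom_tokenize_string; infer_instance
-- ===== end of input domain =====

-- B replaces A's state-machine accumulator with a two-pointer run scanner (objective: alternative).

-- ===== PORT A =====
-- "if current_string: substrings.append(current_string)"
def pushCur (subs : List String) (cur : List Char) : List String :=
  if cur = [] then subs else subs ++ [String.mk cur]

-- the for-loop over the characters, state = (substrings, current_string, alph_dig_other)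
def tokA : List Char → List String → List Char → Int → List String
  | [], subs, cur, _ => pushCur subs cur
  | c :: rest, subs, cur, st =>
    if PySem.Chars.isalpha c then
      (if st == 1 then tokA rest subs (cur ++ [c]) st
       else tokA rest (pushCur subs cur) [c] 1)
    else if PySem.Chars.isdigit c then
      (if st == 2 then tokA rest subs (cur ++ [c]) st
       else tokA rest (pushCur subs cur) [c] 2)
    else
      (if st == 3 then tokA rest subs (cur ++ [c]) st
       else tokA rest (pushCur subs cur) [c] 3)

def tokenize_string (input_string : String) : List String :=
  tokA input_string.toList [] [] 0

-- ===== PORT B =====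
-- key(c): 1 if alpha, 2 elif digit, else 3
def pvKey (c : Char) : Int :=
  if PySem.Chars.isalpha c then 1 else if PySem.Chars.isdigit c then 2 else 3

-- two-pointer run scan: the inner while loop advancing j over the run is the
-- takeWhile/dropWhile split of the remainder
def tokB : List Char → List String
  | [] => []
  | c :: rest =>
      String.mk (c :: rest.takeWhile (fun d => pvKey d == pvKey c)) ::
      tokB (rest.dropWhile (fun d => pvKey d == pvKey c))
termination_by l => l.length
decreasing_by
  exact Nat.lt_succ_of_le (List.length_dropWhile_le _ _)

def tokenize_string_alt (input_string : String) : List String :=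
  tokB input_string.toList

-- ===== PRECONDITION & SPEC =====
def Spec_tokenize_string (input_string : String) (out : List String) : Prop := out = tokenize_string_alt input_string
instance (input_string : String) (out : List String) : Decidable (Spec_tokenize_string input_string out) := by unfold Spec_tokenize_string; infer_instance

-- ===== CLAIM (what is proved, stated in full; the proofs are below) =====
def Claim_equal_tokenize_string : Prop := ∀ (input_string : String), Dom_tokenize_string input_string → Spec_tokenize_string input_string (tokenize_string input_string)

-- ===== LEMMAS AND PROOFS =====

-- A's cons step, rephrased through the classifier pvKey
theorem tokA_cons (c : Char) (rest : List Char) (subs : List String) (cur : List Char) (st : Int) :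
    tokA (c :: rest) subs cur st =
      if st == pvKey c then tokA rest subs (cur ++ [c]) st
      else tokA rest (pushCur subs cur) [c] (pvKey c) := by
  by_cases ha : PySem.Chars.isalpha c <;> by_cases hd : PySem.Chars.isdigit c <;>
    simp [tokA, pvKey, ha, hd]

theorem takeWhile_homog (t l : List Char) (k : Int)
    (ht : ∀ c ∈ t, pvKey c = k)
    (hl : ∀ h l', l = h :: l' → pvKey h ≠ k) :
    (t ++ l).takeWhile (fun d => pvKey d == k) = t ∧
    (t ++ l).dropWhile (fun d => pvKey d == k) = l := by
  induction t with
  | nil =>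
    cases l with
    | nil => simp
    | cons h l' =>
      have := hl h l' rfl
      simp [this]
  | cons a t ih =>
    have ha : pvKey a = k := ht a (by simp)
    have := ih (fun c hc => ht c (by simp [hc]))
    simp [ha, this.1, this.2]

-- main invariant: A's loop from a homogeneous current run equals subs ++ B's grouping of run ++ rest
theorem tokA_eq (l : List Char) : ∀ (subs : List String) (cur : List Char) (st : Int),
    ((cur = [] ∧ st = 0) ∨ (cur ≠ [] ∧ ∀ c ∈ cur, pvKey c = st)) →
    tokA l subs cur st = subs ++ tokB (cur ++ l) := by
  induction l with
  | nil =>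
    intro subs cur st hinv
    rcases hinv with ⟨hc, _⟩ | ⟨hne, hall⟩
    · simp [hc, tokA, pushCur, tokB]
    · rcases cur with _ | ⟨h, t⟩
      · exact absurd rfl hne
      have hH : pvKey h = st := hall h (by simp)
      have hsplit := takeWhile_homog t [] st (fun c hc => hall c (by simp [hc]))
        (by intro h l' hl; simp at hl)
      simp only [List.append_nil] at hsplit ⊢
      simp [tokA, pushCur, tokB, hH, hsplit.1, hsplit.2]
  | cons c rest ih =>
    intro subs cur st hinv
    rw [tokA_cons]
    rcases hinv with ⟨hc, hst⟩ | ⟨hne, hall⟩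
    · subst hc hst
      have hk : ((0 : Int) == pvKey c) = false := by
        unfold pvKey; split_ifs <;> decide
      rw [hk]
      simp only [Bool.false_eq_true, if_false, pushCur, if_true, List.nil_append]
      rw [ih subs [c] (pvKey c) (Or.inr ⟨by simp, by simp⟩)]
      simp
    · by_cases hk : st = pvKey c
      · rw [if_pos (by simp [hk])]
        rw [ih subs (cur ++ [c]) st (Or.inr ⟨by simp, by
          intro d hd
          rcases List.mem_append.1 hd with h | h
          · exact hall d h
          · simp at h; simp [h, hk]⟩)]
        simp
      · rw [if_neg (by simpa using hk)]
        rw [ih (pushCur subs cur) [c] (pvKey c) (Or.inr ⟨by simp, by simp⟩)]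
        rcases cur with _ | ⟨h, t⟩
        · exact absurd rfl hne
        have hH : pvKey h = st := hall h (by simp)
        have hsplit := takeWhile_homog t (c :: rest) st
          (fun d hd => hall d (by simp [hd]))
          (by intro h' l' he; cases he; intro hEq; exact hk hEq.symm)
        have : tokB ((h :: t) ++ c :: rest) = String.mk (h :: t) :: tokB (c :: rest) := by
          simp only [List.cons_append, tokB, hH, hsplit.1, hsplit.2]
        rw [this]
        simp [pushCur]

-- ===== VERDICT (by name: the statement is the Claim_ definition above) =====
theorem tokenize_string_spec : Claim_equal_tokenize_string := by
  intro s _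
  unfold Spec_tokenize_string tokenize_string tokenize_string_alt
  simpa using tokA_eq s.toList [] [] 0 (Or.inl ⟨rfl, rfl⟩)
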